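-- pv_equiv track=rewrite | github.com/FranzOle/Matematika-Komputasi | Source File 3/praktikum7/p4.py | cek_fungsi
-- ===== SOURCE A (Python) =====
-- def cek_fungsi(HimpunanA, HimpunanB, RelasiR):
--     # Ubah relasi R ke set untuk mempermudah pengecekan
--     RelasiR = set(RelasiR)
--     pemetaan = {}
--
--     # Periksa apakah ada elemen A yang memiliki lebih dari satu pasangan
--     for a, b in RelasiR:
--         # Pastikan domain (a) dan kodomain (b) ada di himpunannya
--         if a not in HimpunanA or b not in HimpunanB:
--             return False
--
--         # Jika a sudah punya pasangan sebelumnya (lebih dari 1 output)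
--         if a in pemetaan and pemetaan[a] != b:
--             return False
--         else:
--             pemetaan[a] = b
--
--     # Pastikan setiap elemen di Himpunan A punya tepat 1 pasangan
--     for a in HimpunanA:
--         if a not in pemetaan:
--             return False
--
--     return True
-- ===== SOURCE B (Python) =====
-- def cek_fungsi(HimpunanA, HimpunanB, RelasiR):
--     R = set(RelasiR)
--     domain = {a for a, b in R}
--     images = {b for a, b in R}
--     return (domain == set(HimpunanA)
--             and images <= set(HimpunanB)
--             and len(domain) == len(R))
-- ===== Notes on version B (the rewrite author's own statement) =====
-- stated objective: simpler
-- what changed: Replaced A's incremental dict-building loop with early returns plus a second coverage loop by three set conditions over set(R): domain equals set(A), images are a subset of set(B), and the distinct-domain count equals the distinct-pair count (functionality).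
import Mathlib
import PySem

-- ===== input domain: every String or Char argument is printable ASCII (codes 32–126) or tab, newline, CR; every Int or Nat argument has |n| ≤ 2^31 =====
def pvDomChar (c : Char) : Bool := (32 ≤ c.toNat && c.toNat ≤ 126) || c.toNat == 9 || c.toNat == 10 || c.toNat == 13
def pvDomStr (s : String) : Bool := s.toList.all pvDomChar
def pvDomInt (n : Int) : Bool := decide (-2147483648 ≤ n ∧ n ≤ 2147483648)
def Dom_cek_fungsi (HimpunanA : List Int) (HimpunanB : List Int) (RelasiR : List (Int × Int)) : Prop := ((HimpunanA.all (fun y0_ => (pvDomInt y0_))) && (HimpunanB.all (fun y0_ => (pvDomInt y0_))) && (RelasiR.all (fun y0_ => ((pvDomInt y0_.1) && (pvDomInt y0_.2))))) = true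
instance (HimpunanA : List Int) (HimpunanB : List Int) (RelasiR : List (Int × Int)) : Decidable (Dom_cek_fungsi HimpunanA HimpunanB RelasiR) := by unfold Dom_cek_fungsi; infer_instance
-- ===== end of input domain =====

-- B replaces A's incremental dict-building loop (with early returns) plus a second
-- coverage loop by three order-insensitive set conditions; objective: simpler.

-- ===== PORT A =====
-- A's first loop 'for a, b in RelasiR' carrying the dict 'pemetaan';
-- 'none' = one of A's 'return False' exits inside the loop
def cekLoopA (HimpunanA HimpunanB : List Int) :
    List (Int × Int) → PySem.Dict Int Int → Option (PySem.Dict Int Int)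
  | [], pemetaan => some pemetaan
  | (a, b) :: rest, pemetaan =>
    if ¬ (a ∈ HimpunanA) ∨ ¬ (b ∈ HimpunanB) then none
    else match pemetaan.get? a with
      | some v => if v ≠ b then none
                  else cekLoopA HimpunanA HimpunanB rest (pemetaan.insert a b)
      | none => cekLoopA HimpunanA HimpunanB rest (pemetaan.insert a b)

def cek_fungsi (HimpunanA : List Int) (HimpunanB : List Int) (RelasiR : List (Int × Int)) : Bool :=
  -- 'RelasiR = set(RelasiR)'; A's result does not depend on the set's iteration order
  match cekLoopA HimpunanA HimpunanB (PySem.Set.ofList RelasiR) PySem.Dict.empty with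
  | none => false
  | some pemetaan =>
    -- A's second loop 'for a in HimpunanA: if a not in pemetaan: return False' + 'return True'
    HimpunanA.all (fun a => pemetaan.contains a)

-- ===== PORT B =====
def cek_fungsi_alt (HimpunanA : List Int) (HimpunanB : List Int) (RelasiR : List (Int × Int)) : Bool :=
  let Rs : PySem.Set (Int × Int) := PySem.Set.ofList RelasiR
  let domain : PySem.Set Int := PySem.Set.ofList (Rs.map Prod.fst)
  let images : PySem.Set Int := PySem.Set.ofList (Rs.map Prod.snd)
  PySem.Set.equal domain (PySem.Set.ofList HimpunanA)
    && PySem.Set.issubset images (PySem.Set.ofList HimpunanB)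
    && (PySem.Set.len domain == PySem.Set.len Rs)

-- ===== PRECONDITION & SPEC =====
def Spec_cek_fungsi (HimpunanA : List Int) (HimpunanB : List Int) (RelasiR : List (Int × Int)) (out : Bool) : Prop := out = cek_fungsi_alt HimpunanA HimpunanB RelasiR
instance (HimpunanA : List Int) (HimpunanB : List Int) (RelasiR : List (Int × Int)) (out : Bool) : Decidable (Spec_cek_fungsi HimpunanA HimpunanB RelasiR out) := by unfold Spec_cek_fungsi; infer_instance

-- ===== CLAIM (what is proved, stated in full; the proofs are below) =====
def Claim_equal_cek_fungsi : Prop := ∀ (HimpunanA : List Int) (HimpunanB : List Int) (RelasiR : List (Int × Int)), Dom_cek_fungsi HimpunanA HimpunanB RelasiR → Spec_cek_fungsi HimpunanA HimpunanB RelasiR (cek_fungsi HimpunanA HimpunanB RelasiR)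

-- ===== LEMMAS AND PROOFS =====

-- a list of pairs is "functional": equal first components force equal second components
def FunOn (L : List (Int × Int)) : Prop :=
  ∀ p ∈ L, ∀ q ∈ L, p.1 = q.1 → p.2 = q.2

-- invariant condition for A's loop started at remaining pairs L with dict m
def CondA (A B : List Int) (L : List (Int × Int)) (m : PySem.Dict Int Int) : Prop :=
  (∀ p ∈ L, p.1 ∈ A ∧ p.2 ∈ B)
  ∧ (∀ p ∈ L, ∀ v, m.get? p.1 = some v → v = p.2)
  ∧ FunOn L
  ∧ (∀ x ∈ A, m.contains x = true ∨ x ∈ L.map Prod.fst)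

theorem condA_insert_iff (A B : List Int) (a b : Int) (tl : List (Int × Int))
    (m : PySem.Dict Int Int) (ha : a ∈ A) (hb : b ∈ B)
    (hpass : ∀ v, m.get? a = some v → v = b) :
    CondA A B tl (m.insert a b) ↔ CondA A B ((a, b) :: tl) m := by
  unfold CondA FunOn
  constructor
  · rintro ⟨h1, h2, h3, h4⟩
    have htl : ∀ p ∈ tl, p.1 = a → p.2 = b := by
      intro p hp hpa
      exact (h2 p hp b (by rw [hpa, PySem.Dict.get?_insert_self])).symm
    refine ⟨?_, ?_, ?_, ?_⟩
    · intro p hp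
      rcases List.mem_cons.mp hp with h | h
      · subst h; exact ⟨ha, hb⟩
      · exact h1 p h
    · intro p hp v hv
      rcases List.mem_cons.mp hp with h | h
      · subst h; exact hpass v hv
      · by_cases hpa : p.1 = a
        · rw [htl p h hpa]; rw [hpa] at hv; exact hpass v hv
        · exact h2 p h v (by rw [PySem.Dict.get?_insert, if_neg hpa]; exact hv)
    · intro p hp q hq hpq
      rcases List.mem_cons.mp hp with h | h <;> rcases List.mem_cons.mp hq with h' | h'
      · subst h; subst h'; rfl
      · subst h; exact (htl q h' hpq.symm).symm
      · subst h'; exact htl p h hpq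
      · exact h3 p h q h' hpq
    · intro x hx
      rcases h4 x hx with h | h
      · rw [PySem.Dict.contains_insert] at h
        rcases Bool.or_eq_true_iff.mp h with h' | h'
        · refine Or.inr (List.mem_map.mpr ⟨(a, b), by simp, ?_⟩)
          simpa using (eq_of_beq h').symm
        · exact Or.inl h'
      · refine Or.inr ?_
        rcases List.mem_map.mp h with ⟨p, hp, hpx⟩
        exact List.mem_map.mpr ⟨p, List.mem_cons_of_mem _ hp, hpx⟩
  · rintro ⟨h1, h2, h3, h4⟩
    refine ⟨fun p hp => h1 p (List.mem_cons_of_mem _ hp), ?_, ?_, ?_⟩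
    · intro p hp v hv
      rw [PySem.Dict.get?_insert] at hv
      by_cases hpa : p.1 = a
      · rw [if_pos hpa] at hv
        have hb' : b = v := by injection hv
        rw [← hb']
        exact (h3 (a, b) (by simp) p (List.mem_cons_of_mem _ hp) hpa.symm)
      · rw [if_neg hpa] at hv
        exact h2 p (List.mem_cons_of_mem _ hp) v hv
    · intro p hp q hq
      exact h3 p (List.mem_cons_of_mem _ hp) q (List.mem_cons_of_mem _ hq)
    · intro x hx
      rcases h4 x hx with h | h
      · exact Or.inl (by rw [PySem.Dict.contains_insert, h, Bool.or_true])
      · simp [List.mem_map] at h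
        rcases h with h | h
        · exact Or.inl (by rw [PySem.Dict.contains_insert]; subst h; simp)
        · exact Or.inr (by simp [List.mem_map]; tauto)

theorem cekLoopA_true_iff (A B : List Int) :
    ∀ (L : List (Int × Int)) (m : PySem.Dict Int Int),
    (match cekLoopA A B L m with
      | none => false
      | some m' => A.all (fun a => m'.contains a)) = true ↔ CondA A B L m := by
  intro L
  induction L with
  | nil =>
    intro m
    simp [cekLoopA, CondA, FunOn, List.all_eq_true, PySem.Dict.contains_iff_mem_keys]
  | cons hd tl ih =>
    intro m
    obtain ⟨a, b⟩ := hd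
    by_cases hab : ¬ (a ∈ A) ∨ ¬ (b ∈ B)
    · simp only [cekLoopA, if_pos hab]
      constructor
      · intro h; simp at h
      · rintro ⟨h1, -⟩
        rcases hab with h | h <;> exact absurd (h1 (a, b) (by simp)) (by simp [h])
    · rw [not_or, not_not, not_not] at hab
      simp only [cekLoopA, if_neg (show ¬(¬ (a ∈ A) ∨ ¬ (b ∈ B)) by simp [hab.1, hab.2])]
      rcases hget : m.get? a with _ | v
      · rw [ih (m.insert a b)]
        exact condA_insert_iff A B a b tl m hab.1 hab.2
          (fun v hv => by rw [hget] at hv; cases hv)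
      · show (match (if v ≠ b then none else cekLoopA A B tl (m.insert a b)) with
            | none => false
            | some m' => A.all fun a => m'.contains a) = true ↔ _
        by_cases hvb : v = b
        · subst hvb
          rw [if_neg (by simp)]
          rw [ih (m.insert a v)]
          exact condA_insert_iff A B a v tl m hab.1 hab.2
            (fun w hw => by rw [hget] at hw; injection hw with h; omega)
        · rw [if_pos hvb]
          constructor
          · intro h; simp at h
          · rintro ⟨-, h2, -, -⟩
            exact (hvb (h2 (a, b) (by simp) v hget)).elim

theorem cek_fungsi_true_iff (A B : List Int) (R : List (Int × Int)) :
    cek_fungsi A B R = true ↔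
      ((∀ p ∈ PySem.Set.ofList R, p.1 ∈ A ∧ p.2 ∈ B)
        ∧ FunOn (PySem.Set.ofList R)
        ∧ (∀ x ∈ A, x ∈ (PySem.Set.ofList R).map Prod.fst)) := by
  unfold cek_fungsi
  rw [cekLoopA_true_iff A B (PySem.Set.ofList R) PySem.Dict.empty]
  unfold CondA
  simp [PySem.Dict.get?_empty, PySem.Dict.contains_empty]

-- |set(xs)| = |xs| exactly when xs has no duplicates
theorem ofList_length_eq_iff (xs : List Int) :
    (PySem.Set.ofList xs).length = xs.length ↔ xs.Nodup := by
  constructor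
  · intro h
    induction xs with
    | nil => exact List.nodup_nil
    | cons x xs ih =>
      rw [PySem.Set.ofList_cons] at h
      simp only [List.length_cons] at h
      have hd : (PySem.Set.discard (PySem.Set.ofList xs) x).length = xs.length := by omega
      have hle : (PySem.Set.discard (PySem.Set.ofList xs) x).length ≤ (PySem.Set.ofList xs).length :=
        List.length_filter_le _ _
      have hle2 := PySem.Set.length_ofList_le xs
      have heq : (PySem.Set.ofList xs).length = xs.length := by omega
      have hx : x ∉ xs := by
        intro hx
        have hx' : x ∈ PySem.Set.ofList xs := (PySem.Set.mem_ofList _ _).mpr hx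
        have : (PySem.Set.discard (PySem.Set.ofList xs) x).length < (PySem.Set.ofList xs).length :=
          List.length_filter_lt_length_iff_exists.mpr ⟨x, hx', by simp⟩
        omega
      exact List.nodup_cons.mpr ⟨hx, ih heq⟩
  · intro h
    rw [PySem.Set.ofList_eq_self_of_nodup xs h]

theorem cek_fungsi_alt_true_iff (A B : List Int) (R : List (Int × Int)) :
    cek_fungsi_alt A B R = true ↔
      ((∀ x, x ∈ (PySem.Set.ofList R).map Prod.fst ↔ x ∈ A)
        ∧ (∀ y ∈ (PySem.Set.ofList R).map Prod.snd, y ∈ B)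
        ∧ ((PySem.Set.ofList R).map Prod.fst).Nodup) := by
  unfold cek_fungsi_alt
  simp only [Bool.and_eq_true, PySem.Set.equal_iff, PySem.Set.issubset_iff, beq_iff_eq]
  constructor
  · rintro ⟨⟨h1, h2⟩, h3⟩
    refine ⟨?_, ?_, ?_⟩
    · intro x
      rw [← PySem.Set.mem_ofList ((PySem.Set.ofList R).map Prod.fst) x,
        ← PySem.Set.mem_ofList A x]
      exact h1 x
    · intro y hy
      have := h2 y ((PySem.Set.mem_ofList _ _).mpr hy)
      exact (PySem.Set.mem_ofList B y).mp this
    · rw [← ofList_length_eq_iff]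
      have : ((PySem.Set.ofList R).map Prod.fst).length = (PySem.Set.ofList R).length :=
        List.length_map _
      simp only [PySem.Set.len] at h3
      omega
  · rintro ⟨h1, h2, h3⟩
    refine ⟨⟨?_, ?_⟩, ?_⟩
    · intro x
      rw [PySem.Set.mem_ofList, PySem.Set.mem_ofList]
      exact h1 x
    · intro y hy
      rw [PySem.Set.mem_ofList] at hy ⊢
      exact h2 y hy
    · have : (PySem.Set.ofList ((PySem.Set.ofList R).map Prod.fst)).length
          = ((PySem.Set.ofList R).map Prod.fst).length := (ofList_length_eq_iff _).mpr h3
      simp only [PySem.Set.len]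
      rw [this, List.length_map]

-- bridge: A's three conditions are equivalent to B's three conditions
theorem conds_iff (A B : List Int) (Rs : List (Int × Int)) (hnd : Rs.Nodup) :
    ((∀ p ∈ Rs, p.1 ∈ A ∧ p.2 ∈ B) ∧ FunOn Rs ∧ (∀ x ∈ A, x ∈ Rs.map Prod.fst)) ↔
    ((∀ x, x ∈ Rs.map Prod.fst ↔ x ∈ A) ∧ (∀ y ∈ Rs.map Prod.snd, y ∈ B)
      ∧ (Rs.map Prod.fst).Nodup) := by
  constructor
  · rintro ⟨h1, h2, h3⟩
    refine ⟨?_, ?_, ?_⟩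
    · intro x
      constructor
      · intro hx
        rcases List.mem_map.mp hx with ⟨p, hp, hpx⟩
        exact hpx ▸ (h1 p hp).1
      · exact h3 x
    · intro y hy
      rcases List.mem_map.mp hy with ⟨p, hp, hpy⟩
      exact hpy ▸ (h1 p hp).2
    · exact List.Nodup.map_on
        (fun p hp q hq hpq => Prod.ext hpq (h2 p hp q hq hpq)) hnd
  · rintro ⟨h1, h2, h3⟩
    refine ⟨?_, ?_, fun x hx => (h1 x).mpr hx⟩
    · intro p hp
      exact ⟨(h1 p.1).mp (List.mem_map.mpr ⟨p, hp, rfl⟩),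
        h2 p.2 (List.mem_map.mpr ⟨p, hp, rfl⟩)⟩
    · intro p hp q hq hpq
      have := List.inj_on_of_nodup_map h3 hp hq hpq
      rw [this]

-- ===== VERDICT (by name: the statement is the Claim_ definition above) =====
theorem cek_fungsi_spec : Claim_equal_cek_fungsi := by
  intro A B R _
  unfold Spec_cek_fungsi
  rw [Bool.eq_iff_iff, cek_fungsi_true_iff, cek_fungsi_alt_true_iff]
  exact conds_iff A B (PySem.Set.ofList R) (PySem.Set.nodup_ofList R)
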